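-- pv_equiv track=rewrite | github.com/SajjanPaudel/Goods-optimisation-v2 | load_optimizer.py | _classify_labels
-- ===== SOURCE A (Python) =====
-- from typing import Any, Dict, FrozenSet, Iterable, List, Optional, Set, Tuple
--
-- def _classify_labels(labels: Iterable[str]) -> Tuple[bool, bool, bool, bool]:
--     c1 = c52 = c42 = cother = False
--     for raw in labels:
--         lbl = (raw or "").strip()
--         if not lbl:
--             continue
--         if lbl.startswith("1"):
--             c1 = True
--         elif lbl == "5.2":
--             c52 = True
--         elif lbl == "4.2":
--             c42 = True
--         else:
--             cother = True
--     return c1, c52, c42, cother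
-- ===== SOURCE B (Python) =====
-- # B: builds the set of cleaned non-empty labels once, then computes each flag
-- # by an independent scan/membership test over that set (simpler decomposition).
-- def _classify_labels(labels):
--     cleaned = {(raw or "").strip() for raw in labels}
--     cleaned.discard("")
--     c1 = any(l.startswith("1") for l in cleaned)
--     c52 = "5.2" in cleaned
--     c42 = "4.2" in cleaned
--     cother = any(not l.startswith("1") and l != "5.2" and l != "4.2" for l in cleaned)
--     return (c1, c52, c42, cother)
-- ===== Notes on version B (the rewrite author's own statement) =====
-- stated objective: simpler
-- what changed: Replaces the single accumulator-mutating loop with a build of the set of cleaned non-empty labels followed by four independent scans/membership tests.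
import Mathlib
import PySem

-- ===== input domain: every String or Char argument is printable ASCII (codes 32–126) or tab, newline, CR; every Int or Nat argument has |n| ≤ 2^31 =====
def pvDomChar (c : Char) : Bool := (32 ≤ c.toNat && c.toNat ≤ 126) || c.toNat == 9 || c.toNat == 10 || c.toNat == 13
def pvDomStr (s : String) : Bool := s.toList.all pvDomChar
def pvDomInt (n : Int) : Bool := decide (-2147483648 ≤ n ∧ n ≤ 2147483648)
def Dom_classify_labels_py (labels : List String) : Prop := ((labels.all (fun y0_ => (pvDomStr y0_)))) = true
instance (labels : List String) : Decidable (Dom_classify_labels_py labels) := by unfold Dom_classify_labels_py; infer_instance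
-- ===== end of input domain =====

-- B builds the set of cleaned non-empty labels once, then computes each flag by an
-- independent scan/membership test over that set (simpler decomposition, same cost).

-- shared helper: Python's (raw or "").strip()
def pvClean (raw : String) : String := PySem.Str.strip (if raw == "" then "" else raw)

-- ===== PORT A =====
def classify_labels_py (labels : List String) : Bool × Bool × Bool × Bool :=
  labels.foldl
    (fun s raw =>
      let lbl := pvClean raw
      if lbl == "" then s
      else if PySem.Str.startswith lbl "1" then (true, s.2.1, s.2.2.1, s.2.2.2)
      else if lbl == "5.2" then (s.1, true, s.2.2.1, s.2.2.2)
      else if lbl == "4.2" then (s.1, s.2.1, true, s.2.2.2)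
      else (s.1, s.2.1, s.2.2.1, true))
    (false, false, false, false)

-- ===== PORT B =====
def classify_labels_py_alt (labels : List String) : Bool × Bool × Bool × Bool :=
  let cleaned : PySem.Set String :=
    PySem.Set.discard (PySem.Set.ofList (labels.map pvClean)) ""
  (cleaned.any (fun l => PySem.Str.startswith l "1"),
   PySem.Set.contains cleaned "5.2",
   PySem.Set.contains cleaned "4.2",
   cleaned.any (fun l => !(PySem.Str.startswith l "1") && l != "5.2" && l != "4.2"))

-- ===== PRECONDITION & SPEC =====
def Spec_classify_labels_py (labels : List String) (out : Bool × Bool × Bool × Bool) : Prop := out = classify_labels_py_alt labels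
instance (labels : List String) (out : Bool × Bool × Bool × Bool) : Decidable (Spec_classify_labels_py labels out) := by unfold Spec_classify_labels_py; infer_instance

-- ===== CLAIM (what is proved, stated in full; the proofs are below) =====
def Claim_equal_classify_labels_py : Prop := ∀ (labels : List String), Dom_classify_labels_py labels → Spec_classify_labels_py labels (classify_labels_py labels)

-- ===== LEMMAS AND PROOFS =====

-- the four predicates, on the already-cleaned label
def pvQ1 (l : String) : Bool := PySem.Str.startswith l "1"
def pvQ52 (l : String) : Bool := l == "5.2"
def pvQ42 (l : String) : Bool := l == "4.2"
def pvQother (l : String) : Bool := !(l == "") && !(PySem.Str.startswith l "1") && !(l == "5.2") && !(l == "4.2")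

-- A's fold, characterised by List.any over the cleaned labels with OR-accumulators
theorem pvFoldA (labels : List String) (s : Bool × Bool × Bool × Bool) :
    labels.foldl
      (fun s raw =>
        let lbl := pvClean raw
        if lbl == "" then s
        else if PySem.Str.startswith lbl "1" then (true, s.2.1, s.2.2.1, s.2.2.2)
        else if lbl == "5.2" then (s.1, true, s.2.2.1, s.2.2.2)
        else if lbl == "4.2" then (s.1, s.2.1, true, s.2.2.2)
        else (s.1, s.2.1, s.2.2.1, true)) s
    = (s.1 || (labels.map pvClean).any pvQ1,
       s.2.1 || (labels.map pvClean).any pvQ52,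
       s.2.2.1 || (labels.map pvClean).any pvQ42,
       s.2.2.2 || (labels.map pvClean).any pvQother) := by
  induction labels generalizing s with
  | nil => simp
  | cons x xs ih =>
    simp only [List.foldl_cons, List.map_cons, List.any_cons]
    rw [ih]
    by_cases h0 : pvClean x = ""
    · rw [if_pos (by simpa using h0)]
      simp [pvQ1, pvQ52, pvQ42, pvQother, h0,
        (by decide : PySem.Chars.startswith ([] : List Char) ['1'] = false), PySem.Str.startswith]
    · rw [if_neg (by simpa using h0)]
      by_cases h1 : PySem.Str.startswith (pvClean x) "1" = true
      · rw [if_pos h1]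
        have hc1 : PySem.Chars.startswith (pvClean x).toList ['1'] = true := by
          simpa using h1
        have e52 : (pvClean x == "5.2") = false := by
          cases hc : (pvClean x == "5.2") with
          | false => rfl
          | true =>
            rw [show pvClean x = "5.2" from by simpa using hc] at h1
            exact absurd h1 (by decide)
        have e42 : (pvClean x == "4.2") = false := by
          cases hc : (pvClean x == "4.2") with
          | false => rfl
          | true =>
            rw [show pvClean x = "4.2" from by simpa using hc] at h1
            exact absurd h1 (by decide)
        simp [pvQ1, pvQ52, pvQ42, pvQother, hc1, e52, e42, Bool.or_comm]
      · rw [if_neg h1]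
        by_cases h52 : pvClean x = "5.2"
        · rw [if_pos (by simpa using h52)]
          simp [pvQ1, pvQ52, pvQ42, pvQother, h52,
            (by decide : PySem.Chars.startswith ['5', '.', '2'] ['1'] = false), Bool.or_comm]
        · rw [if_neg (by simpa using h52)]
          by_cases h42 : pvClean x = "4.2"
          · rw [if_pos (by simpa using h42)]
            simp [pvQ1, pvQ52, pvQ42, pvQother, h42,
              (by decide : PySem.Chars.startswith ['4', '.', '2'] ['1'] = false), Bool.or_comm]
          · rw [if_neg (by simpa using h42)]
            have hc1 : PySem.Chars.startswith (pvClean x).toList ['1'] = false := by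
              simpa using h1
            have e52 : (pvClean x == "5.2") = false := beq_eq_false_iff_ne.mpr h52
            have e42 : (pvClean x == "4.2") = false := beq_eq_false_iff_ne.mpr h42
            simp [pvQ1, pvQ52, pvQ42, pvQother, h0, hc1, e52, e42]

-- any over the deduplicated, ""-discarded set = any over the raw cleaned list,
-- with the predicate guarded by non-emptiness
theorem pvAnySet (L : List String) (p : String → Bool) :
    (PySem.Set.discard (PySem.Set.ofList L) "").any p = L.any (fun l => !(l == "") && p l) := by
  apply Bool.eq_iff_iff.mpr
  simp only [List.any_eq_true, Bool.and_eq_true, Bool.not_eq_true', beq_eq_false_iff_ne]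
  constructor
  · rintro ⟨x, hx, hpx⟩
    have h := (PySem.Set.mem_discard _ _ _).mp hx
    exact ⟨x, (PySem.Set.mem_ofList _ _).mp h.1, h.2, hpx⟩
  · rintro ⟨x, hx, hne, hpx⟩
    exact ⟨x, (PySem.Set.mem_discard _ _ _).mpr ⟨(PySem.Set.mem_ofList _ _).mpr hx, hne⟩, hpx⟩

theorem pvContainsSet (L : List String) (v : String) (hv : v ≠ "") :
    PySem.Set.contains (PySem.Set.discard (PySem.Set.ofList L) "") v = L.any (fun l => l == v) := by
  apply Bool.eq_iff_iff.mpr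
  rw [PySem.Set.contains_iff]
  simp only [List.any_eq_true, beq_iff_eq]
  constructor
  · intro h
    exact ⟨v, (PySem.Set.mem_ofList _ _).mp ((PySem.Set.mem_discard _ _ _).mp h).1, rfl⟩
  · rintro ⟨x, hx, rfl⟩
    exact (PySem.Set.mem_discard _ _ _).mpr ⟨(PySem.Set.mem_ofList _ _).mpr hx, hv⟩

-- ===== VERDICT (by name: the statement is the Claim_ definition above) =====
theorem classify_labels_py_spec : Claim_equal_classify_labels_py := by
  intro labels _
  unfold Spec_classify_labels_py classify_labels_py classify_labels_py_alt
  rw [pvFoldA labels (false, false, false, false)]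
  set L := labels.map pvClean with hL
  have h1 : (PySem.Set.discard (PySem.Set.ofList L) "").any (fun l => PySem.Str.startswith l "1") = L.any pvQ1 := by
    rw [pvAnySet]
    congr 1
    funext l
    by_cases h : l = ""
    · subst h; decide
    · simp [pvQ1, beq_eq_false_iff_ne.mpr h]
  have h52 := pvContainsSet L "5.2" (by decide)
  have h42 := pvContainsSet L "4.2" (by decide)
  have hoth : (PySem.Set.discard (PySem.Set.ofList L) "").any
      (fun l => !(PySem.Str.startswith l "1") && l != "5.2" && l != "4.2") = L.any pvQother := by
    rw [pvAnySet]
    congr 1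
    funext l
    simp [pvQother, bne, Bool.and_assoc]
  simp only [h1, h52, h42, hoth, Bool.false_or]
  rfl
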